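-- pv_equiv track=rewrite | github.com/Paul-AntoinePechmeja-Richard/Projet-UTBM-COV | articleCrawler/articleCrawler/spiders/getpmids_spider.py | create_url_to_pmcids
-- ===== SOURCE A (Python) =====
-- from itertools import zip_longest
--
-- def grouper(iterable, n, fillvalue=None):
--     """
--     Function that divide an iterable in groups of n element
--     :param iterable:     The iterable to divide
--     :param n:            The size of the groups
--     :param fillvalue:    The fillvalue to fill the non-existent value in a group, None by default
--     :return:             The list of the diferent groups formatted to the size we want
--     """
--     args = [iter(iterable)] * n
--     return zip_longest(*args, fillvalue=fillvalue)
--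
-- def create_url_to_pmcids(ids):
--     """
--     Function that create a list of url to fetch the pmcids from the pmids.
--     The API we ask only support GET action and 200 elements.
--     :param ids:         The list of pmid to convert into pmcids
--     :return:            The list of url to fetch the pmcids
--     """
--     url_ids = "https://www.ncbi.nlm.nih.gov/pmc/utils/idconv/v1.0/?ids="
--     convert_url = []
--     for groupe in grouper(ids, 200):
--         groupe = list(filter(None,list(groupe)))
--         parameters=""
--         for id in groupe:
--             parameters = parameters + id +","
--         parameters = parameters[:-1] + "&format=json"
--         convert_url.append(url_ids + parameters)
--     return convert_url
-- ===== SOURCE B (Python) =====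
-- def create_url_to_pmcids(ids):
--     """
--     Function that create a list of url to fetch the pmcids from the pmids.
--     The API we ask only support GET action and 200 elements.
--     :param ids:         The list of pmid to convert into pmcids
--     :return:            The list of url to fetch the pmcids
--     """
--     url_ids = "https://www.ncbi.nlm.nih.gov/pmc/utils/idconv/v1.0/?ids="
--     urls = []
--     chunk = []   # the truthy ids of the current group of 200
--     count = 0    # how many ids (truthy or not) of the current group were seen
--     for id in ids:
--         if id:
--             chunk.append(id)
--         count += 1
--         if count == 200:
--             urls.append(url_ids + ",".join(chunk) + "&format=json")
--             chunk = []
--             count = 0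
--     if count:
--         urls.append(url_ids + ",".join(chunk) + "&format=json")
--     return urls
-- ===== Notes on version B (the rewrite author's own statement) =====
-- stated objective: simpler
-- what changed: Replaces the iterator-sharing zip_longest grouper (pad with None, then filter the padding and falsy ids back out and strip a trailing comma with [:-1]) by one streaming pass that counts ids, accumulates the truthy ones, and flushes a ','.join-built URL every 200 ids and once for a non-empty remainder.
import Mathlib
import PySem

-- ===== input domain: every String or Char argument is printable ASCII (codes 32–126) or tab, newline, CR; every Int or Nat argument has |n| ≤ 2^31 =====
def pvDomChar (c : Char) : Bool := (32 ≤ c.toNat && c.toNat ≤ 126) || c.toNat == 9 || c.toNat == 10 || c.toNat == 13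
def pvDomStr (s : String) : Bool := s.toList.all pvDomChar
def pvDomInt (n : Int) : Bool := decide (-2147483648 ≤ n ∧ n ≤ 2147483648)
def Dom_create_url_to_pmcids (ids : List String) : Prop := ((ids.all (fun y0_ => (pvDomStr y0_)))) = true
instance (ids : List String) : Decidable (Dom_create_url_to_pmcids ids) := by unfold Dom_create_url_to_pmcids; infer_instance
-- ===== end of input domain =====

-- B replaces A's zip_longest/pad-and-refilter grouping by a single counting pass that flushes every 200 ids (objective: simpler).

-- ===== PORT A =====
-- grouper(ids, 200): groups of exactly 200, the last padded with None (the fillvalue)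
def pvGrouperA : List String → List (List (Option String))
  | [] => []
  | x :: rest =>
      (((x :: rest).take 200).map some ++ List.replicate (200 - (x :: rest).length) none)
        :: pvGrouperA ((x :: rest).drop 200)
  termination_by l => l.length
  decreasing_by simp

-- filter(None, …)'s truthiness test on an element of a padded group: drops None and ""
def pvTruthy? (o : Option String) : Option String :=
  match o with
  | none => none
  | some s => if s.toList.isEmpty then none else some s

-- the body of A's for-loop: filter(None, group), build "id," concatenation, strip the last char with [:-1], wrap
def pvGroupUrlA (g : List (Option String)) : String :=
  let groupe := g.filterMap pvTruthy?
  let parameters : List Char := groupe.foldl (fun p id => p ++ id.toList ++ [',']) []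
  let parameters := PySem.List.slice parameters none (some (-1)) ++ "&format=json".toList  -- parameters[:-1] + "&format=json"
  String.ofList ("https://www.ncbi.nlm.nih.gov/pmc/utils/idconv/v1.0/?ids=".toList ++ parameters)

def create_url_to_pmcids (ids : List String) : List String :=
  (pvGrouperA ids).foldl (fun acc g => acc ++ [pvGroupUrlA g]) []

-- ===== PORT B =====
-- url_ids + ",".join(chunk) + "&format=json"
def pvFlushB (chunk : List String) : String :=
  String.ofList ("https://www.ncbi.nlm.nih.gov/pmc/utils/idconv/v1.0/?ids=".toList
    ++ PySem.Chars.join [','] (chunk.map String.toList) ++ "&format=json".toList)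

-- Source B's for-loop: state = (current chunk of truthy ids, raw count of the group, urls so far)
def pvLoopB : List String → List String → Nat → List String → List String
  | [], chunk, count, urls => if count ≠ 0 then urls ++ [pvFlushB chunk] else urls
  | id :: rest, chunk, count, urls =>
      let chunk := if id.toList.isEmpty then chunk else chunk ++ [id]
      let count := count + 1
      if count = 200 then pvLoopB rest [] 0 (urls ++ [pvFlushB chunk])
      else pvLoopB rest chunk count urls

def create_url_to_pmcids_alt (ids : List String) : List String :=
  pvLoopB ids [] 0 []

-- ===== PRECONDITION & SPEC =====
def Spec_create_url_to_pmcids (ids : List String) (out : List String) : Prop := out = create_url_to_pmcids_alt ids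
instance (ids : List String) (out : List String) : Decidable (Spec_create_url_to_pmcids ids out) := by unfold Spec_create_url_to_pmcids; infer_instance

-- ===== CLAIM (what is proved, stated in full; the proofs are below) =====
def Claim_equal_create_url_to_pmcids : Prop := ∀ (ids : List String), Dom_create_url_to_pmcids ids → Spec_create_url_to_pmcids ids (create_url_to_pmcids ids)

-- ===== LEMMAS AND PROOFS =====

-- structural equations of the well-founded pvGrouperA
theorem pvGrouperA_nil : pvGrouperA [] = [] := by simp [pvGrouperA]

theorem pvGrouperA_cons (x : String) (rest : List String) :
    pvGrouperA (x :: rest)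
      = (((x :: rest).take 200).map some ++ List.replicate (200 - (x :: rest).length) none)
        :: pvGrouperA ((x :: rest).drop 200) := by
  simp [pvGrouperA]

-- the truthy ids of a prefix, as B's loop keeps them
def pvKeep (l : List String) : List String := l.filter (fun s => !s.toList.isEmpty)

theorem pvKeep_append (l t : List String) : pvKeep (l ++ t) = pvKeep l ++ pvKeep t := by
  simp [pvKeep]

-- A's comma-append fold is the flatten of "id," pieces
theorem pvFoldl_flatten (l : List String) (acc : List Char) :
    l.foldl (fun p id => p ++ id.toList ++ [',']) acc
      = acc ++ (l.map (fun id => id.toList ++ [','])).flatten := by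
  induction l generalizing acc with
  | nil => simp
  | cons x t ih => simp [List.append_assoc]

-- dropping the final comma of the flatten is a ","-join
theorem pvDropLast_flatten_join (l : List String) :
    ((l.map (fun id => id.toList ++ [','])).flatten).dropLast
      = PySem.Chars.join [','] (l.map String.toList) := by
  induction l with
  | nil => simp [PySem.Chars.join_nil]
  | cons x t ih =>
    cases t with
    | nil => simp [PySem.Chars.join_singleton, List.dropLast_append_of_ne_nil]
    | cons y u =>
      simp only [List.map_cons] at ih ⊢
      rw [List.flatten_cons, List.dropLast_append_of_ne_nil (by simp), ih,
          PySem.Chars.join_cons_cons]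

-- filter(None, …) on a some-mapped list padded with none is B's truthy filter
theorem pvFilterMap_pad (l : List String) (k : Nat) :
    (l.map some ++ List.replicate k none).filterMap pvTruthy? = pvKeep l := by
  induction l with
  | nil => simp [pvKeep, pvTruthy?]
  | cons x t ih =>
    have hcons : List.filterMap pvTruthy? (some x :: (t.map some ++ List.replicate k none))
        = if x.toList.isEmpty then List.filterMap pvTruthy? (t.map some ++ List.replicate k none)
          else x :: List.filterMap pvTruthy? (t.map some ++ List.replicate k none) := by
      rw [List.filterMap_cons,
          show pvTruthy? (some x) = if x.toList.isEmpty then none else some x from rfl]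
      by_cases hx : x.toList.isEmpty
      · rw [if_pos hx, if_pos hx]
      · rw [if_neg hx, if_neg hx]
    rw [List.map_cons, List.cons_append, hcons, ih]
    by_cases hx : x.toList.isEmpty <;> simp [pvKeep, hx]

-- A's per-group URL of a padded group equals B's flush of the kept ids
theorem pvGroupUrlA_eq (l : List String) (k : Nat) :
    pvGroupUrlA (l.map some ++ List.replicate k none) = pvFlushB (pvKeep l) := by
  simp only [pvGroupUrlA, pvFlushB]
  rw [pvFilterMap_pad, pvFoldl_flatten]
  have hslice : ∀ cs : List Char, PySem.List.slice cs none (some (-1)) = cs.dropLast := by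
    intro cs; simp [pysem]
  rw [hslice]
  simp [pvDropLast_flatten_join (pvKeep l)]

-- MAIN INVARIANT: B's loop, entered with the state a prefix `pre` (|pre| < 200) of the
-- current group leaves behind, produces `urls` followed by A's URLs for `pre ++ rest`.
theorem pvLoop_eq (rest : List String) : ∀ (pre urls : List String), pre.length < 200 →
    pvLoopB rest (pvKeep pre) pre.length urls
      = urls ++ (pvGrouperA (pre ++ rest)).map pvGroupUrlA := by
  induction rest with
  | nil =>
    intro pre urls hlt
    cases pre with
    | nil => simp [pvLoopB, pvGrouperA_nil]
    | cons x t =>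
      rw [List.append_nil]
      have h1 : (x :: t).length ≤ 200 := by omega
      have hchunks : pvGrouperA (x :: t)
          = [((x :: t).map some ++ List.replicate (200 - (x :: t).length) none)] := by
        rw [pvGrouperA_cons, List.take_of_length_le h1, List.drop_eq_nil_of_le h1, pvGrouperA_nil]
      rw [hchunks]
      show (if (x :: t).length ≠ 0 then urls ++ [pvFlushB (pvKeep (x :: t))] else urls) = _
      rw [List.map_singleton, pvGroupUrlA_eq (x :: t)]
      simp
  | cons id rest ih =>
    intro pre urls hlt
    show pvLoopB (id :: rest) (pvKeep pre) pre.length urls = _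
    rw [pvLoopB]
    have hchunk : (if id.toList.isEmpty then pvKeep pre else pvKeep pre ++ [id]) = pvKeep (pre ++ [id]) := by
      rw [pvKeep_append]
      by_cases h : id.toList.isEmpty <;> simp [pvKeep, h]
    rw [hchunk]
    by_cases h200 : pre.length + 1 = 200
    · rw [if_pos h200]
      have hIH := ih [] (urls ++ [pvFlushB (pvKeep (pre ++ [id]))]) (by simp)
      show pvLoopB rest (pvKeep ([] : List String)) (([] : List String).length) (urls ++ [pvFlushB (pvKeep (pre ++ [id]))]) = _
      rw [hIH]
      have hlen : (pre ++ [id]).length = 200 := by simp; omega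
      have hgr : pvGrouperA (pre ++ id :: rest)
          = ((pre ++ [id]).map some ++ List.replicate (200 - (pre ++ [id]).length) none)
            :: pvGrouperA rest := by
        have hsplit : pre ++ id :: rest = (pre ++ [id]) ++ rest := by simp
        rw [hsplit]
        have hne : (pre ++ [id]) ++ rest ≠ [] := by simp
        obtain ⟨y, t, hyt⟩ := List.exists_cons_of_ne_nil hne
        rw [hyt, pvGrouperA_cons, ← hyt]
        rw [List.take_append_of_le_length (by omega), List.drop_append_of_le_length (by omega)]
        rw [List.take_of_length_le (by omega), List.drop_eq_nil_of_le (by omega)]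
        have hz1 : 200 - (pre ++ [id] ++ rest).length = 0 := by
          simp only [List.length_append, List.length_cons, List.length_nil] at hlen ⊢
          omega
        have hz2 : 200 - (pre ++ [id]).length = 0 := by rw [hlen]
        rw [hz1, hz2]
        simp
      rw [hgr, List.map_cons, pvGroupUrlA_eq (pre ++ [id])]
      simp
    · rw [if_neg h200]
      have := ih (pre ++ [id]) urls (by simp; omega)
      simp only [List.length_append, List.length_cons, List.length_nil, Nat.zero_add] at this
      rw [this]
      simp

-- ===== VERDICT (by name: the statement is the Claim_ definition above) =====
theorem create_url_to_pmcids_spec : Claim_equal_create_url_to_pmcids := by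
  intro ids _
  unfold Spec_create_url_to_pmcids create_url_to_pmcids create_url_to_pmcids_alt
  rw [PySem.List.foldl_append_singleton_eq_map pvGroupUrlA (pvGrouperA ids) []]
  exact (pvLoop_eq ids [] [] (by simp)).symm
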